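-- pv_equiv track=rewrite | github.com/Richard-Qin-001/discrete-math-2026-logic-library | logic/truth_table.py | generate_rademacher_numbers
-- ===== SOURCE A (Python) =====
-- def generate_rademacher_numbers(n):
--     """
--     Generate Rademacher numbers (binary patterns for truth table columns).
--     Used for efficiently generating all combinations of truth values for n variables.
--
--     Args:
--         n: Number of variables
--
--     Returns:
--         List of Rademacher numbers as integers, one for each variable
--     """
--
--     length = 1 << n
--     results = []
--
--     for i in range(n):
--         half_len = 1 << i
--         ones = (1 << half_len) - 1
--         unit = ones << half_len
--         current_num = unit
--         current_len = 1 << (i + 1)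
--
--         while current_len < length:
--             current_num = (current_num << current_len) | current_num
--             current_len <<= 1
--
--         results.append(current_num)
--
--     return results
-- ===== SOURCE B (Python) =====
-- def generate_rademacher_numbers(n):
--     # B: instead of finishing each column with its own doubling while-loop,
--     # grow the whole truth table at once: each doubling of the row count
--     # multiplies every existing column pattern by (2**rows + 1)
--     # (one shift-and-add) and appends the new variable's single-period column.
--     total_rows = 1 << n
--     results = []
--     rows = 1
--     while rows < total_rows:
--         results = [(v << rows) + v for v in results]
--         results.append(((1 << rows) - 1) << rows)
--         rows <<= 1
--     return results
-- ===== Notes on version B (the rewrite author's own statement) =====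
-- stated objective: alternative
-- what changed: Replaces A's per-column inner doubling while-loop (OR-ing each column onto a shifted copy of itself until it spans 2^n rows) with a single outer recurrence over the table size: each of the n steps doubles the row count, rewriting every existing column by one shift-and-add and appending the new variable's single-period column.
import Mathlib
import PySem

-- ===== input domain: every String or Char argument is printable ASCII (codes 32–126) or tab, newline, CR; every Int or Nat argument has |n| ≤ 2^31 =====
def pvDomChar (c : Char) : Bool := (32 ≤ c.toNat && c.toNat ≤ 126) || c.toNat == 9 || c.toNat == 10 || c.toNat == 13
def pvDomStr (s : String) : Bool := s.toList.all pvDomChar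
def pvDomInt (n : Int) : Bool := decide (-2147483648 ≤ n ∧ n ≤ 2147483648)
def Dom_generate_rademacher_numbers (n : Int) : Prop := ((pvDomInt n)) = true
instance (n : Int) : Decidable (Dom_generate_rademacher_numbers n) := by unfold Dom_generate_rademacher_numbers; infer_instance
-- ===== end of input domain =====

-- B replaces A's per-column doubling while-loop by one outer loop that doubles the whole table's row count; objective: alternative (same cost, different decomposition).

-- ===== PORT A =====
-- the inner 'while current_len < length' loop; fuel bounds the iteration count
-- (the loop doubles current_len, so n iterations always suffice; fuel is only a
-- totality guard, the computation is Python's step for step)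
def pvAWhile : Nat → Int → Int → Nat → Int
  | 0, _, current_num, _ => current_num
  | fuel + 1, length, current_num, current_len =>
    if (current_len : Int) < length then
      -- current_num = (current_num << current_len) | current_num ; current_len <<= 1
      pvAWhile fuel length (PySem.Int.bor (current_num <<< current_len) current_num)
        (current_len <<< 1)
    else current_num

def generate_rademacher_numbers (n : Int) : List Int :=
  let length : Int := (1 : Int) <<< n.toNat        -- 1 << n ; exact since Pre_ gives 0 ≤ n
  (List.range n.toNat).map (fun i =>       -- for i in range(n), appending = map
    let half_len : Nat := 1 <<< i
    let ones : Int := (1 : Int) <<< half_len - 1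
    let unit : Int := ones <<< half_len
    pvAWhile n.toNat length unit (1 <<< (i + 1)))

-- ===== PORT B =====
-- the 'while rows < total_rows' loop; fuel is only a totality guard (rows
-- doubles each pass, so n passes always suffice), the body is Source B's step for step
def pvBLoop : Nat → Int → List Int → Nat → List Int
  | 0, _, results, _ => results
  | fuel + 1, total_rows, results, rows =>
    if (rows : Int) < total_rows then
      pvBLoop fuel total_rows
        ((results.map fun v : Int => (v <<< rows) + v)   -- [(v << rows) + v for v in results]
          ++ [((1 : Int) <<< rows - 1) <<< rows])        -- results.append(((1 << rows) - 1) << rows)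
        (rows <<< 1)                                     -- rows <<= 1
    else results

def generate_rademacher_numbers_alt (n : Int) : List Int :=
  pvBLoop n.toNat ((1 : Int) <<< n.toNat) [] 1   -- total_rows = 1 << n; exact since Pre_ gives 0 ≤ n

-- ===== PRECONDITION & SPEC =====
-- Python raises ValueError ('negative shift count') for n < 0; both programs do.
def Pre_generate_rademacher_numbers (n : Int) : Prop := 0 ≤ n
instance (n : Int) : Decidable (Pre_generate_rademacher_numbers n) := by
  unfold Pre_generate_rademacher_numbers; infer_instance
def pvWitness_generate_rademacher_numbers : Int := 3

def Spec_generate_rademacher_numbers (n : Int) (out : List Int) : Prop :=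
  out = generate_rademacher_numbers_alt n
instance (n : Int) (out : List Int) : Decidable (Spec_generate_rademacher_numbers n out) := by
  unfold Spec_generate_rademacher_numbers; infer_instance

-- ===== CLAIM (what is proved, stated in full; the proofs are below) =====
def Claim_equal_generate_rademacher_numbers : Prop := ∀ (n : Int), Dom_generate_rademacher_numbers n → Pre_generate_rademacher_numbers n → Spec_generate_rademacher_numbers n (generate_rademacher_numbers n)

-- ===== LEMMAS AND PROOFS =====

-- disjoint OR is addition: (a * 2^k) ||| b = a * 2^k + b when b < 2^k (Nat)
theorem pv_nat_or_eq_add (a b k : Nat) (h : b < 2 ^ k) :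
    (a * 2 ^ k) ||| b = a * 2 ^ k + b := by
  apply Nat.eq_of_testBit_eq
  intro i
  rw [Nat.testBit_lor, Nat.mul_comm, Nat.testBit_two_pow_mul_add a h i,
    Nat.testBit_two_pow_mul]
  by_cases hi : i < k
  · simp [hi, Nat.not_le_of_lt hi]
  · have hk : k ≤ i := Nat.le_of_not_lt hi
    simp [hi, hk,
      Nat.testBit_eq_false_of_lt (Nat.lt_of_lt_of_le h (Nat.pow_le_pow_right (by norm_num) hk))]

theorem pv_toNat_two_pow (k : Nat) : ((2 : Int) ^ k).toNat = 2 ^ k := by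
  induction k with
  | zero => rfl
  | succ m ihm =>
    rw [pow_succ, pow_succ, Int.toNat_mul (by positivity) (by norm_num), ihm]
    rfl

-- the Int version for the loop body
theorem pv_bor_step (num : Int) (k : Nat) (h0 : 0 ≤ num) (h1 : num < 2 ^ k) :
    PySem.Int.bor (num <<< k) num = num * 2 ^ k + num := by
  have hs : num <<< k = num * 2 ^ k := Int.shiftLeft_eq num k
  have h0' : (0 : Int) ≤ num * 2 ^ k := by positivity
  rw [hs, PySem.Int.bor_of_nonneg h0' h0]
  have hnum : (num.toNat : Int) = num := Int.toNat_of_nonneg h0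
  have hpow : ((2 : Int) ^ k).toNat = 2 ^ k := pv_toNat_two_pow k
  have htn : (num * 2 ^ k).toNat = num.toNat * 2 ^ k := by
    rw [Int.toNat_mul h0 (by positivity), hpow]
  have hlt : num.toNat < 2 ^ k := by
    rw [← pv_toNat_two_pow k]
    omega
  rw [htn, pv_nat_or_eq_add _ _ _ hlt]
  push_cast
  rw [hnum]

-- invariant of the doubling loop: result * (2^(2^t) - 1) = num * (2^(2^n) - 1)
theorem pv_while_eq (f : Nat) : ∀ (N t : Nat) (num : Int), t ≤ N → N - t ≤ f →
    0 ≤ num → num < 2 ^ (2 ^ t) →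
    pvAWhile f ((2 : Int) ^ N) num (2 ^ t) * ((2 : Int) ^ (2 ^ t) - 1)
      = num * ((2 : Int) ^ (2 ^ N) - 1) := by
  induction f with
  | zero =>
    intro N t num ht hf h0 h1
    have : t = N := by omega
    subst this
    simp [pvAWhile]
  | succ f ih =>
    intro N t num ht hf h0 h1
    by_cases hlt : t < N
    · have hcond : ((2 ^ t : Nat) : Int) < (2 : Int) ^ N := by
        push_cast
        exact pow_lt_pow_right₀ (by norm_num) hlt
      rw [pvAWhile, if_pos hcond, pv_bor_step num (2 ^ t) h0 h1]
      have hshift : (2 ^ t) <<< 1 = 2 ^ (t + 1) := by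
        rw [Nat.shiftLeft_eq, pow_one, ← pow_succ]
      set x : Int := (2 : Int) ^ (2 ^ t) with hx
      have hxpos : (0 : Int) < x := by positivity
      have hnum' : num * x + num = num * (x + 1) := by ring
      have hsq : x * x = (2 : Int) ^ (2 ^ (t + 1)) := by
        have he : 2 ^ t + 2 ^ t = 2 ^ (t + 1) := by rw [pow_succ]; ring
        rw [hx, ← pow_add, he]
      have hb0 : 0 ≤ num * (x + 1) := by positivity
      have hb1 : num * (x + 1) < 2 ^ (2 ^ (t + 1)) := by
        rw [← hsq]
        nlinarith
      have hrec := ih N (t + 1) (num * (x + 1)) (by omega) (by omega) hb0 hb1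
      rw [hshift, hnum']
      have hxne : x + 1 ≠ 0 := by positivity
      apply mul_right_cancel₀ hxne
      calc pvAWhile f ((2:Int)^N) (num * (x + 1)) (2 ^ (t + 1)) * (x - 1) * (x + 1)
          = pvAWhile f ((2:Int)^N) (num * (x + 1)) (2 ^ (t + 1)) * ((2:Int) ^ (2 ^ (t+1)) - 1) := by
            rw [← hsq]; ring
        _ = num * (x + 1) * ((2 : Int) ^ (2 ^ N) - 1) := hrec
        _ = num * ((2 : Int) ^ (2 ^ N) - 1) * (x + 1) := by ring
    · have hEq : t = N := by omega
      subst hEq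
      have hcond : ¬ (((2 ^ t : Nat) : Int) < (2 : Int) ^ t) := by
        push_cast
        exact lt_irrefl _
      rw [pvAWhile, if_neg hcond]

-- B's step function (the lambda of the foldl in the alt port)
def pvBStep (results : List Int) (m : Nat) : List Int :=
  let rows : Nat := 1 <<< m
  (results.map fun v : Int => (v <<< rows) + v) ++ [((1 : Int) <<< rows - 1) <<< rows]

theorem pvBLoop_foldl (f : Nat) : ∀ (N m : Nat), m ≤ N → N - m ≤ f →
    pvBLoop f ((2 : Int) ^ N) ((List.range m).foldl pvBStep []) (2 ^ m)
      = (List.range N).foldl pvBStep [] := by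
  induction f with
  | zero =>
    intro N m hm hf
    have : m = N := by omega
    subst this
    rfl
  | succ f ih =>
    intro N m hm hf
    by_cases hlt : m < N
    · have hcond : ((2 ^ m : Nat) : Int) < (2 : Int) ^ N := by
        push_cast
        exact pow_lt_pow_right₀ (by norm_num) hlt
      rw [pvBLoop, if_pos hcond]
      have hshift : (2 ^ m) <<< 1 = 2 ^ (m + 1) := by
        rw [Nat.shiftLeft_eq, pow_one, ← pow_succ]
      have hbody : (((List.range m).foldl pvBStep []).map
            (fun v : Int => (v <<< (2 ^ m : Nat)) + v))
            ++ [((1 : Int) <<< (2 ^ m : Nat) - 1) <<< (2 ^ m : Nat)]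
          = (List.range (m + 1)).foldl pvBStep [] := by
        rw [List.range_succ, List.foldl_append, List.foldl_cons, List.foldl_nil]
        show _ = pvBStep ((List.range m).foldl pvBStep []) m
        simp only [pvBStep, Nat.one_shiftLeft]
      rw [hshift]
      exact (congrArg (fun L => pvBLoop f ((2 : Int) ^ N) L (2 ^ (m + 1))) hbody).trans
        (ih N (m + 1) (by omega) (by omega))
    · have : m = N := by omega
      subst this
      have hcond : ¬ (((2 ^ m : Nat) : Int) < (2 : Int) ^ m) := by
        push_cast
        exact lt_irrefl _
      rw [pvBLoop, if_neg hcond]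

theorem pvB_foldl_eq (n : Int) :
    generate_rademacher_numbers_alt n = (List.range n.toNat).foldl pvBStep [] := by
  unfold generate_rademacher_numbers_alt
  rw [Int.shiftLeft_eq, one_mul]
  have h0 : (1 : Nat) = 2 ^ 0 := rfl
  have h1 : ([] : List Int) = (List.range 0).foldl pvBStep [] := rfl
  rw [h0, h1]
  exact pvBLoop_foldl n.toNat n.toNat 0 (by omega) (by omega)

theorem pvB_len (m : Nat) : ((List.range m).foldl pvBStep []).length = m := by
  induction m with
  | zero => rfl
  | succ m ih =>
    rw [List.range_succ, List.foldl_append, List.foldl_cons, List.foldl_nil]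
    simp [pvBStep, ih]

-- each entry of B's accumulated table satisfies the same product equation as
-- A's finished column
theorem pvB_char (m : Nat) : ∀ (i : Nat) (hi : i < m),
    (((List.range m).foldl pvBStep [])[i]'(by rw [pvB_len]; exact hi))
        * ((2 : Int) ^ (2 ^ (i + 1)) - 1)
      = ((2 : Int) ^ (2 ^ i) - 1) * 2 ^ (2 ^ i) * ((2 : Int) ^ (2 ^ m) - 1) := by
  induction m with
  | zero => intro i hi; omega
  | succ m ih =>
    intro i hi
    have hlen : ((List.range m).foldl pvBStep []).length = m := pvB_len m
    have hstep : (List.range (m + 1)).foldl pvBStep []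
        = pvBStep ((List.range m).foldl pvBStep []) m := by
      rw [List.range_succ, List.foldl_append, List.foldl_cons, List.foldl_nil]
    by_cases him : i < m
    · have hmap : (((List.range m).foldl pvBStep []).map
            (fun v : Int => (v <<< (1 <<< m)) + v)).length = m := by
        rw [List.length_map, hlen]
      have hget : ((List.range (m + 1)).foldl pvBStep [])[i]'(by rw [pvB_len]; exact hi)
          = (((List.range m).foldl pvBStep [])[i]'(by rw [hlen]; exact him))
              * ((2 : Int) ^ (2 ^ m) + 1) := by
        simp only [hstep]
        show (((((List.range m).foldl pvBStep []).map
            (fun v : Int => (v <<< (1 <<< m)) + v)) ++ _)[i]'_) = _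
        rw [List.getElem_append_left (by rw [hmap]; exact him), List.getElem_map]
        simp only [Int.shiftLeft_eq, Nat.one_shiftLeft]
        ring
      rw [hget]
      have hrec := ih i him
      have hsq : ((2 : Int) ^ (2 ^ m)) * ((2 : Int) ^ (2 ^ m))
          = (2 : Int) ^ (2 ^ (m + 1)) := by
        have h2 : 2 ^ m + 2 ^ m = 2 ^ (m + 1) := by rw [pow_succ]; ring
        rw [← pow_add, h2]
      calc (((List.range m).foldl pvBStep [])[i]'(by rw [hlen]; exact him))
              * ((2 : Int) ^ (2 ^ m) + 1) * ((2 : Int) ^ (2 ^ (i + 1)) - 1)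
          = (((List.range m).foldl pvBStep [])[i]'(by rw [hlen]; exact him))
              * ((2 : Int) ^ (2 ^ (i + 1)) - 1) * ((2 : Int) ^ (2 ^ m) + 1) := by ring
        _ = ((2 : Int) ^ (2 ^ i) - 1) * 2 ^ (2 ^ i) * ((2 : Int) ^ (2 ^ m) - 1)
              * ((2 : Int) ^ (2 ^ m) + 1) := by rw [ih i him]
        _ = ((2 : Int) ^ (2 ^ i) - 1) * 2 ^ (2 ^ i) * ((2 : Int) ^ (2 ^ (m + 1)) - 1) := by
              rw [← hsq]; ring
    · have hieq : i = m := by omega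
      subst hieq
      have hget : ((List.range (i + 1)).foldl pvBStep [])[i]'(by rw [pvB_len]; omega)
          = ((2 : Int) ^ (2 ^ i) - 1) * 2 ^ (2 ^ i) := by
        simp only [hstep]
        show (((((List.range i).foldl pvBStep []).map
            (fun v : Int => (v <<< (1 <<< i)) + v)) ++ [((1 : Int) <<< (1 <<< i) - 1) <<< (1 <<< i)])[i]'_) = _
        rw [List.getElem_append_right (by simp [pvB_len])]
        simp [List.length_map, pvB_len, Int.shiftLeft_eq, Nat.one_shiftLeft]
      rw [hget]

-- ===== VERDICT (by name: the statement is the Claim_ definition above) =====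
theorem generate_rademacher_numbers_spec : Claim_equal_generate_rademacher_numbers := by
  intro n _ _
  unfold Spec_generate_rademacher_numbers
  rw [pvB_foldl_eq]
  unfold generate_rademacher_numbers
  apply List.ext_getElem
  · simp [pvB_len]
  · intro i h1 h2
    have hi : i < n.toNat := by
      have := pvB_len n.toNat
      omega
    simp only [List.getElem_map, List.getElem_range]
    simp only [Int.shiftLeft_eq, Nat.one_shiftLeft, one_mul]
    set N := n.toNat with hN
    set M : Int := 2 ^ (2 ^ i) with hM
    have hMpos : (0 : Int) < M := by positivity
    have hsq : M * M = (2 : Int) ^ (2 ^ (i + 1)) := by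
      have h2 : 2 ^ i + 2 ^ i = 2 ^ (i + 1) := by rw [pow_succ]; ring
      rw [hM, ← pow_add, h2]
    have hub : (M - 1) * M < 2 ^ (2 ^ (i + 1)) := by
      rw [← hsq]; nlinarith
    have hinv := pv_while_eq N N (i + 1) ((M - 1) * M) (by omega) (by omega)
      (mul_nonneg (by omega) (by omega)) hub
    have hd : (0 : Int) < 2 ^ (2 ^ (i + 1)) - 1 := by
      have h1' : (2 : Int) ^ 1 ≤ 2 ^ (2 ^ (i + 1)) :=
        pow_le_pow_right₀ (by norm_num) (Nat.one_le_two_pow)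
      simp at h1'
      omega
    apply mul_right_cancel₀ (ne_of_gt hd)
    rw [hinv, pvB_char N i hi]
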